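-- pv_equiv track=rewrite | github.com/ErickOF/Python-Tutorias | SI.2020/Ejercicios Ciclos-Recursividad/ejercicios_ciclos_recursividad_solución_ciclos.py | insertarDigEnOrden
-- ===== SOURCE A (Python) =====
-- def insertarDigEnOrden(num, digitoAInsertar):
--     # Variable donde se guarda el nuevo numero con el digito insertado
--     nuevo = 0
--     # Factor el cual nos ayuda a aplicar la idea de notacion desarrollada
--     factor = 1
--     # Variable que indica si el digito se inserto
--     insertado = False
--
--     while num != 0 and not insertado:
--         # Guardar el digito de mas a la derecha
--         dig = num % 10
--
--         # Si el digito a insertar es menor o igual al digito actual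
--         if dig >= digitoAInsertar:
--             # Se inserta ese digito junto a lo que queda del numero
--             nuevo += digitoAInsertar * factor + num * factor * 10
--             # Se indica que ya se inserto el numero
--             insertado = True
--         # Si no
--         else:
--             # Se agrega el digito de nuevo al numero
--             nuevo += dig * factor
--
--         # Se corta el digito de mas a la derecha
--         num //= 10
--         # Se multiplica factor por diez
--         factor *= 10
--
--     # Si el valor no se inserto
--     if not insertado:
--         # Se agrega como digito de mas a la izquierda
--         nuevo += digitoAInsertar * factor
--
--     return nuevo
-- ===== SOURCE B (Python) =====
-- def insertarDigEnOrden(num, digitoAInsertar):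
--     if num == 0:
--         return digitoAInsertar
--     dig = num % 10
--     if dig >= digitoAInsertar:
--         return num * 10 + digitoAInsertar
--     return insertarDigEnOrden(num // 10, digitoAInsertar) * 10 + dig
-- ===== Notes on version B (the rewrite author's own statement) =====
-- stated objective: simpler
-- what changed: Replaces A's while-loop with its nuevo/factor accumulator pair by a direct structural recursion over the digits that rebuilds the number on the way out of the recursion.
import Mathlib
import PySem

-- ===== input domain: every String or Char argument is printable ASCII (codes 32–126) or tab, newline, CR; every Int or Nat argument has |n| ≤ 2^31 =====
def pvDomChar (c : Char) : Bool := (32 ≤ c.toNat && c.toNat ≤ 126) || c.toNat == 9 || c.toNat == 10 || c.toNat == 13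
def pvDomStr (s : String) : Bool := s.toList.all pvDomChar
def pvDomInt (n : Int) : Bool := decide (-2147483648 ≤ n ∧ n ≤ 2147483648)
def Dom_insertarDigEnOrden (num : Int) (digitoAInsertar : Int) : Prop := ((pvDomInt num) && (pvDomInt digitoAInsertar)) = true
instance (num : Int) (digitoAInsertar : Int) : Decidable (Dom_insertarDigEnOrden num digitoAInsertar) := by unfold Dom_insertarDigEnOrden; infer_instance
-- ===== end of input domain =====

-- B replaces A's while-loop with its running 'nuevo'/'factor' accumulators by a direct
-- structural recursion over the digits of num (objective: simpler, same cost).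

-- ===== PORT A =====
-- A's while loop; when the branch 'dig >= digitoAInsertar' fires the loop is exited
-- (insertado = True; the trailing num //= 10, factor *= 10 no longer affect nuevo).
-- The 'else 0' guard only makes the recursion total: Python A diverges exactly there
-- (num < 0 with digitoAInsertar > 9), which lies outside Pre_.
def insertarDigEnOrdenLoop (digitoAInsertar num nuevo factor : Int) : Int :=
  if num = 0 then nuevo + digitoAInsertar * factor
  else
    let dig := PySem.Int.mod num 10
    if dig ≥ digitoAInsertar then
      nuevo + (digitoAInsertar * factor + num * factor * 10)
    else if h : (PySem.Int.floordiv num 10).natAbs < num.natAbs then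
      insertarDigEnOrdenLoop digitoAInsertar (PySem.Int.floordiv num 10) (nuevo + dig * factor) (factor * 10)
    else 0
termination_by num.natAbs
decreasing_by simpa [PySem.Int.floordiv] using h

def insertarDigEnOrden (num : Int) (digitoAInsertar : Int) : Int :=
  insertarDigEnOrdenLoop digitoAInsertar num 0 1

-- ===== PORT B =====
-- same totality guard; Python B hits RecursionError exactly there (outside Pre_)
def insertarDigEnOrden_alt (num : Int) (digitoAInsertar : Int) : Int :=
  if num = 0 then digitoAInsertar
  else
    let dig := PySem.Int.mod num 10
    if dig ≥ digitoAInsertar then num * 10 + digitoAInsertar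
    else if h : (PySem.Int.floordiv num 10).natAbs < num.natAbs then
      insertarDigEnOrden_alt (PySem.Int.floordiv num 10) digitoAInsertar * 10 + dig
    else 0
termination_by num.natAbs
decreasing_by simpa [PySem.Int.floordiv] using h

-- ===== PRECONDITION & SPEC =====
-- Pre_ excludes exactly the inputs where Python A never returns (infinite loop):
-- num < 0 with digitoAInsertar > 9, where num //= 10 gets stuck at -1 and no digit ever
-- reaches digitoAInsertar. (Python B raises RecursionError there.)
def Pre_insertarDigEnOrden (num : Int) (digitoAInsertar : Int) : Prop :=
  0 ≤ num ∨ digitoAInsertar ≤ 9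
instance (num : Int) (digitoAInsertar : Int) : Decidable (Pre_insertarDigEnOrden num digitoAInsertar) := by unfold Pre_insertarDigEnOrden; infer_instance
def pvWitness_insertarDigEnOrden : Int × Int := (1357, 4)

def Spec_insertarDigEnOrden (num : Int) (digitoAInsertar : Int) (out : Int) : Prop := out = insertarDigEnOrden_alt num digitoAInsertar
instance (num : Int) (digitoAInsertar : Int) (out : Int) : Decidable (Spec_insertarDigEnOrden num digitoAInsertar out) := by unfold Spec_insertarDigEnOrden; infer_instance

-- ===== CLAIM (what is proved, stated in full; the proofs are below) =====
def Claim_equal_insertarDigEnOrden : Prop := ∀ (num : Int) (digitoAInsertar : Int), Dom_insertarDigEnOrden num digitoAInsertar → Pre_insertarDigEnOrden num digitoAInsertar → Spec_insertarDigEnOrden num digitoAInsertar (insertarDigEnOrden num digitoAInsertar)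

-- ===== LEMMAS AND PROOFS =====

-- inside Pre_, the totality guard at a recursion point always holds
lemma pv_guard (num digitoAInsertar : Int) (hnz : num ≠ 0)
    (hpre : 0 ≤ num ∨ digitoAInsertar ≤ 9)
    (hlt : PySem.Int.mod num 10 < digitoAInsertar) :
    (PySem.Int.floordiv num 10).natAbs < num.natAbs := by
  have h1 := PySem.Int.floordiv_mul_add_mod num 10
  have h2 := PySem.Int.mod_nonneg num (b := 10) (by norm_num)
  have h3 := PySem.Int.mod_lt num (b := 10) (by norm_num)
  omega

-- Pre_ is preserved by the loop step
lemma pv_pre_step (num digitoAInsertar : Int)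
    (hpre : 0 ≤ num ∨ digitoAInsertar ≤ 9) :
    0 ≤ PySem.Int.floordiv num 10 ∨ digitoAInsertar ≤ 9 := by
  rcases hpre with h | h
  · left
    have h1 := PySem.Int.floordiv_mul_add_mod num 10
    have h2 := PySem.Int.mod_nonneg num (b := 10) (by norm_num)
    have h3 := PySem.Int.mod_lt num (b := 10) (by norm_num)
    omega
  · right; exact h

-- loop invariant: A's accumulator form equals nuevo + factor · (B's recursion)
lemma pv_loop_eq (digitoAInsertar : Int) :
    ∀ num nuevo factor : Int, (0 ≤ num ∨ digitoAInsertar ≤ 9) →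
      insertarDigEnOrdenLoop digitoAInsertar num nuevo factor
        = nuevo + factor * insertarDigEnOrden_alt num digitoAInsertar := by
  intro num
  induction num using (measure Int.natAbs).wf.induction with
  | _ num ih =>
    intro nuevo factor hpre
    unfold insertarDigEnOrdenLoop insertarDigEnOrden_alt
    by_cases h0 : num = 0
    · simp only [h0, if_true]; ring
    · simp only [if_neg h0]
      by_cases hge : PySem.Int.mod num 10 ≥ digitoAInsertar
      · simp only [if_pos hge]; ring
      · have hlt : PySem.Int.mod num 10 < digitoAInsertar := by omega
        have hg := pv_guard num digitoAInsertar h0 hpre hlt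
        simp only [if_neg (by omega : ¬ PySem.Int.mod num 10 ≥ digitoAInsertar), dif_pos hg]
        rw [ih (PySem.Int.floordiv num 10) hg _ _ (pv_pre_step num digitoAInsertar hpre)]
        ring

-- ===== VERDICT (by name: the statement is the Claim_ definition above) =====
theorem insertarDigEnOrden_spec : Claim_equal_insertarDigEnOrden := by
  intro num digitoAInsertar _ hpre
  unfold Spec_insertarDigEnOrden insertarDigEnOrden
  rw [pv_loop_eq digitoAInsertar num 0 1 hpre]
  ring
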